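-- pv_equiv track=rewrite | github.com/aleix-quirante/nexus-graph-ai | core/schema_map.py | get_standard_rel
-- ===== SOURCE A (Python) =====
-- SCHEMA_MAP = {
--     "labels": {
--         "EMPRESA": ["e", "PROVEEDOR", "CLIENTE", "SOCIEDAD"],
--         "PEDIDO": ["p", "ORDEN", "ENCARGO", "PRODUCTO"],
--         "RIESGO": ["r", "PROBLEMA", "ALERTA", "RETRASO"],
--         "EMPLEADO": ["persona", "COMERCIAL", "RESPONSABLE"],
--     },
--     "relationships": {
--         "REALIZA_PEDIDO": ["HACE_PEDIDO", "TIENE_PEDIDO", "COMPRA", "SOLICITA"],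
--         "ATIENDE_PEDIDO": ["TIENE_PRECIO", "SUMINISTRA", "PROVEE"],
--         "TIENE_RIESGO": ["CONTIENE_RIESGO", "RIESGO_DETECTADO"],
--         "ASIGNADO_A": ["LLEVA_CUENTA", "RESPONSABLE_DE"],
--     },
--     "properties": {
--         "id": ["nombre", "name", "identificador", "entidad"],
--         "monto": ["precio", "presupuesto", "coste", "valor"],
--         "descripcion": ["nota", "detalle", "observacion"],
--     },
-- }
--
-- def get_standard_rel(raw_rel: str) -> str:
--     """
--     Devuelve la clave estándar del diccionario si el raw_rel está en su lista de valores.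
--     """
--     if not raw_rel:
--         return ""
--
--     raw_upper = raw_rel.upper()
--
--     for standard_key, aliases in SCHEMA_MAP.get("relationships", {}).items():
--         if raw_upper == standard_key:
--             return standard_key
--         if raw_upper in [alias.upper() for alias in aliases]:
--             return standard_key
--
--     return raw_upper
-- ===== SOURCE B (Python) =====
-- SCHEMA_MAP = {
--     "labels": {
--         "EMPRESA": ["e", "PROVEEDOR", "CLIENTE", "SOCIEDAD"],
--         "PEDIDO": ["p", "ORDEN", "ENCARGO", "PRODUCTO"],
--         "RIESGO": ["r", "PROBLEMA", "ALERTA", "RETRASO"],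
--         "EMPLEADO": ["persona", "COMERCIAL", "RESPONSABLE"],
--     },
--     "relationships": {
--         "REALIZA_PEDIDO": ["HACE_PEDIDO", "TIENE_PEDIDO", "COMPRA", "SOLICITA"],
--         "ATIENDE_PEDIDO": ["TIENE_PRECIO", "SUMINISTRA", "PROVEE"],
--         "TIENE_RIESGO": ["CONTIENE_RIESGO", "RIESGO_DETECTADO"],
--         "ASIGNADO_A": ["LLEVA_CUENTA", "RESPONSABLE_DE"],
--     },
--     "properties": {
--         "id": ["nombre", "name", "identificador", "entidad"],
--         "monto": ["precio", "presupuesto", "coste", "valor"],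
--         "descripcion": ["nota", "detalle", "observacion"],
--     },
-- }
--
-- # Flat index precomputed once: every standard key and every uppercased alias
-- # maps to its standard key; first insertion wins (matches the scan order of A).
-- _REL_INDEX = {}
-- for _key, _aliases in SCHEMA_MAP["relationships"].items():
--     _REL_INDEX.setdefault(_key, _key)
--     for _alias in _aliases:
--         _REL_INDEX.setdefault(_alias.upper(), _key)
--
--
-- def get_standard_rel(raw_rel: str) -> str:
--     if not raw_rel:
--         return ""
--     raw_upper = raw_rel.upper()
--     return _REL_INDEX.get(raw_upper, raw_upper)
-- ===== Notes on version B (the rewrite author's own statement) =====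
-- stated objective: simpler
-- what changed: Replaces the per-call nested scan over SCHEMA_MAP['relationships'] (key check plus re-uppercasing every alias list on each call) with a module-level flat alias-to-key index built once, so the function body is a single dict lookup with raw_upper as default.
import Mathlib
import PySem

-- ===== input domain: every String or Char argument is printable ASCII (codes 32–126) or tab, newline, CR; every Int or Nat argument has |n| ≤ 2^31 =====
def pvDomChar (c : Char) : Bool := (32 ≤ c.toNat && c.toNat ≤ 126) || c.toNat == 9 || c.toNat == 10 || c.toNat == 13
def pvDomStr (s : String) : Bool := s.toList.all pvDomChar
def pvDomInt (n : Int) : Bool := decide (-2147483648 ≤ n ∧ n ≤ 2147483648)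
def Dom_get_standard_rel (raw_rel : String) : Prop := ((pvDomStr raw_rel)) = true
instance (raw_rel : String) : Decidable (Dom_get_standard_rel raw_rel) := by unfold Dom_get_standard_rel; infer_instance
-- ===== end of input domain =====

-- B replaces A's per-call scan over SCHEMA_MAP["relationships"] by a single lookup in a
-- flat alias→key index precomputed once (objective: simpler/faster constant-factor lookup).

-- ===== PORT A =====
-- SCHEMA_MAP["relationships"] as an insertion-ordered association list
def pvRelItems : List (String × List String) :=
  [("REALIZA_PEDIDO", ["HACE_PEDIDO", "TIENE_PEDIDO", "COMPRA", "SOLICITA"]),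
   ("ATIENDE_PEDIDO", ["TIENE_PRECIO", "SUMINISTRA", "PROVEE"]),
   ("TIENE_RIESGO", ["CONTIENE_RIESGO", "RIESGO_DETECTADO"]),
   ("ASIGNADO_A", ["LLEVA_CUENTA", "RESPONSABLE_DE"])]

-- the for-loop over .items(): first matching standard key, else fall through to raw_upper
def pvScan (raw_upper : String) : List (String × List String) → String
  | [] => raw_upper
  | (standard_key, aliases) :: rest =>
    if raw_upper == standard_key then standard_key
    else if (aliases.map PySem.Str.upper).contains raw_upper then standard_key
    else pvScan raw_upper rest

def get_standard_rel (raw_rel : String) : String :=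
  if raw_rel == "" then ""
  else pvScan (PySem.Str.upper raw_rel) pvRelItems

-- ===== PORT B =====
-- module-level index: for each (key, aliases) in insertion order, setdefault key→key then
-- setdefault upper(alias)→key (first insertion wins, as in Source B)
def pvRelIndex : PySem.Dict String String :=
  pvRelItems.foldl
    (fun d kv =>
      kv.2.foldl (fun d a => d.setdefault (PySem.Str.upper a) kv.1) (d.setdefault kv.1 kv.1))
    PySem.Dict.empty

def get_standard_rel_alt (raw_rel : String) : String :=
  if raw_rel == "" then ""
  else
    let raw_upper := PySem.Str.upper raw_rel
    pvRelIndex.getD raw_upper raw_upper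

-- ===== PRECONDITION & SPEC =====
def Spec_get_standard_rel (raw_rel : String) (out : String) : Prop := out = get_standard_rel_alt raw_rel
instance (raw_rel : String) (out : String) : Decidable (Spec_get_standard_rel raw_rel out) := by unfold Spec_get_standard_rel; infer_instance

-- ===== CLAIM (what is proved, stated in full; the proofs are below) =====
def Claim_equal_get_standard_rel : Prop := ∀ (raw_rel : String), Dom_get_standard_rel raw_rel → Spec_get_standard_rel raw_rel (get_standard_rel raw_rel)

-- ===== LEMMAS AND PROOFS =====
theorem pvRelIndex_eq : pvRelIndex = PySem.Dict.mk
    [("REALIZA_PEDIDO","REALIZA_PEDIDO"), ("HACE_PEDIDO","REALIZA_PEDIDO"), ("TIENE_PEDIDO","REALIZA_PEDIDO"),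
     ("COMPRA","REALIZA_PEDIDO"), ("SOLICITA","REALIZA_PEDIDO"), ("ATIENDE_PEDIDO","ATIENDE_PEDIDO"),
     ("TIENE_PRECIO","ATIENDE_PEDIDO"), ("SUMINISTRA","ATIENDE_PEDIDO"), ("PROVEE","ATIENDE_PEDIDO"),
     ("TIENE_RIESGO","TIENE_RIESGO"), ("CONTIENE_RIESGO","TIENE_RIESGO"), ("RIESGO_DETECTADO","TIENE_RIESGO"),
     ("ASIGNADO_A","ASIGNADO_A"), ("LLEVA_CUENTA","ASIGNADO_A"), ("RESPONSABLE_DE","ASIGNADO_A")] := by decide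

theorem pvScan_eq_getD (u : String) : pvScan u pvRelItems = pvRelIndex.getD u u := by
  rw [pvRelIndex_eq]
  by_cases h1 : u = "REALIZA_PEDIDO"
  · subst h1; decide
  by_cases h2 : u = "HACE_PEDIDO"
  · subst h2; decide
  by_cases h3 : u = "TIENE_PEDIDO"
  · subst h3; decide
  by_cases h4 : u = "COMPRA"
  · subst h4; decide
  by_cases h5 : u = "SOLICITA"
  · subst h5; decide
  by_cases h6 : u = "ATIENDE_PEDIDO"
  · subst h6; decide
  by_cases h7 : u = "TIENE_PRECIO"
  · subst h7; decide
  by_cases h8 : u = "SUMINISTRA"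
  · subst h8; decide
  by_cases h9 : u = "PROVEE"
  · subst h9; decide
  by_cases h10 : u = "TIENE_RIESGO"
  · subst h10; decide
  by_cases h11 : u = "CONTIENE_RIESGO"
  · subst h11; decide
  by_cases h12 : u = "RIESGO_DETECTADO"
  · subst h12; decide
  by_cases h13 : u = "ASIGNADO_A"
  · subst h13; decide
  by_cases h14 : u = "LLEVA_CUENTA"
  · subst h14; decide
  by_cases h15 : u = "RESPONSABLE_DE"
  · subst h15; decide
  have h1' := Ne.symm h1
  have h2' := Ne.symm h2
  have h3' := Ne.symm h3
  have h4' := Ne.symm h4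
  have h5' := Ne.symm h5
  have h6' := Ne.symm h6
  have h7' := Ne.symm h7
  have h8' := Ne.symm h8
  have h9' := Ne.symm h9
  have h10' := Ne.symm h10
  have h11' := Ne.symm h11
  have h12' := Ne.symm h12
  have h13' := Ne.symm h13
  have h14' := Ne.symm h14
  have h15' := Ne.symm h15
  have e1 : (["HACE_PEDIDO", "TIENE_PEDIDO", "COMPRA", "SOLICITA"].map PySem.Str.upper) = ["HACE_PEDIDO", "TIENE_PEDIDO", "COMPRA", "SOLICITA"] := by decide
  have e2 : (["TIENE_PRECIO", "SUMINISTRA", "PROVEE"].map PySem.Str.upper) = ["TIENE_PRECIO", "SUMINISTRA", "PROVEE"] := by decide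
  have e3 : (["CONTIENE_RIESGO", "RIESGO_DETECTADO"].map PySem.Str.upper) = ["CONTIENE_RIESGO", "RIESGO_DETECTADO"] := by decide
  have e4 : (["LLEVA_CUENTA", "RESPONSABLE_DE"].map PySem.Str.upper) = ["LLEVA_CUENTA", "RESPONSABLE_DE"] := by decide
  simp [pvScan, pvRelItems, e1, e2, e3, e4, PySem.Dict.getD_eq_get?_getD,
    PySem.Dict.get?, h1, h1', h2, h2', h3, h3', h4, h4', h5, h5', h6, h6', h7, h7', h8, h8', h9, h9', h10, h10', h11, h11', h12, h12', h13, h13', h14, h14', h15, h15']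

-- ===== VERDICT (by name: the statement is the Claim_ definition above) =====
theorem get_standard_rel_spec : Claim_equal_get_standard_rel := by
  intro raw_rel _
  unfold Spec_get_standard_rel get_standard_rel get_standard_rel_alt
  by_cases h : raw_rel == ""
  · simp [h]
  · simp [h, pvScan_eq_getD]
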